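-- pv_equiv track=rewrite | github.com/Olu-wafemi/First-repository-at-Dsc | day5.py | wedding_chow
-- ===== SOURCE A (Python) =====
-- def wedding_chow(chow):
--     '''This programme returns a tuple of two elements where the first element is an integer representing the maximum number of guests that can recieve complete chow and the second is the left over chow as astring arranged in order (rsmfd)'''
--     base = ['r','s','m','f','d']
--     b = []
--
--     for i in chow:
--         b.append(i)
--         for j in b:
--             n = b.count(j)
--
--             if j in base:
--                 sol = len(b)//5
--                 n = len(b)%5
--
--
--
--
--
--
--
--
--     return (sol,chow[0:n])
-- ===== SOURCE B (Python) =====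
-- def wedding_chow(chow):
--     guests, leftover = divmod(len(chow), 5)
--     return (guests, chow[:leftover])
-- ===== Notes on version B (the rewrite author's own statement) =====
-- stated objective: simpler
-- what changed: Replaced the nested append/count loops by one closed-form divmod of the string length; Pre_ excludes strings with no base character, on which A raises UnboundLocalError.
-- intended difference: On strings whose last character is not one of the five base characters, A returns chow sliced to the number of occurrences of that last character (leftover state of its inner scan), while B returns the first len(chow)%5 characters; B's value is the intended leftover of dividing the chow among guests in groups of five. — e.g. on wedding_chow("rx"): A returns (0, "r"), B returns (0, "rx")
import Mathlib
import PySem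

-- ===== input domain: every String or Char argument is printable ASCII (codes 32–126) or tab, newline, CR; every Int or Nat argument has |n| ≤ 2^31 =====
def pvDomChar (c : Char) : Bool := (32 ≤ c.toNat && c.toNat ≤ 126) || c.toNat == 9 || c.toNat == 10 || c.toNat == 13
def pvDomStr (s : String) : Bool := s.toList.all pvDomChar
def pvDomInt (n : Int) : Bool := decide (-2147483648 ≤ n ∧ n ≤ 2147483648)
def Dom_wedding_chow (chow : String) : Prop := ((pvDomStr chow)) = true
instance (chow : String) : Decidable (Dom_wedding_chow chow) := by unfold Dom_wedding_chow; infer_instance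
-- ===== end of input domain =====

-- B computes guests and leftover by one closed-form divmod of the length (simpler); A's leftover
-- slice when the last character is not a base character is stated as an intended difference D_.

-- ===== PORT A =====
def wedding_chow (chow : String) : Int × String :=
  let base : List Char := ['r', 's', 'm', 'f', 'd']
  let st := chow.toList.foldl
    (fun (st : List Char × Option Int × Option Int) i =>
      let b := st.1 ++ [i]
      let sn := b.foldl
        (fun (sn : Option Int × Option Int) j =>
          let n : Option Int := some (PySem.List.count b j : Int)
          if j ∈ base then
            (some (PySem.Int.floordiv (b.length : Int) 5),
             some (PySem.Int.mod (b.length : Int) 5))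
          else (sn.1, n))
        st.2
      (b, sn))
    ([], none, none)
  -- Python raises UnboundLocalError when sol/n were never assigned; those inputs are outside Pre_
  (st.2.1.getD 0, PySem.Str.slice chow (some 0) (some (st.2.2.getD 0)))

-- ===== PORT B =====
def wedding_chow_alt (chow : String) : Int × String :=
  let guests : Int := PySem.Int.floordiv (PySem.Str.len chow) 5
  let leftover : Int := PySem.Int.mod (PySem.Str.len chow) 5
  (guests, PySem.Str.slice chow none (some leftover))

-- ===== PRECONDITION & SPEC =====
-- Pre_ excludes exactly the inputs where A raises UnboundLocalError ('sol' never assigned):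
-- strings containing none of the five base characters (including the empty string).
def Pre_wedding_chow (chow : String) : Prop := (chow.toList.any (fun c => c ∈ (['r', 's', 'm', 'f', 'd'] : List Char))) = true
instance (chow : String) : Decidable (Pre_wedding_chow chow) := by unfold Pre_wedding_chow; infer_instance
def pvWitness_wedding_chow : String := "rsx"

-- On strings that contain a base character but end in a non-base character, A returns chow sliced
-- to the number of occurrences of that last character (leftover state of its inner scan), while B
-- returns the first len(chow) mod 5 characters — the intended leftover after serving groups of five.
def D_wedding_chow (chow : String) : Prop :=
  (chow.toList.any (fun c => c ∈ (['r', 's', 'm', 'f', 'd'] : List Char))) = true ∧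
  (chow.toList.getLast?.all (fun c => decide (c ∉ (['r', 's', 'm', 'f', 'd'] : List Char)))) = true
instance (chow : String) : Decidable (D_wedding_chow chow) := by unfold D_wedding_chow; infer_instance

def Spec_wedding_chow (chow : String) (out : Int × String) : Prop := ¬ D_wedding_chow chow → out = wedding_chow_alt chow
instance (chow : String) (out : Int × String) : Decidable (Spec_wedding_chow chow out) := by unfold Spec_wedding_chow; infer_instance

def pvDiffWitness_wedding_chow : String := "rx"
def pvDiffWitnessOut_wedding_chow : (Int × String) × (Int × String) := ((0, "r"), (0, "rx"))

-- ===== CLAIM (what is proved, stated in full; the proofs are below) =====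
def Claim_unchanged_wedding_chow : Prop := ∀ (chow : String), Dom_wedding_chow chow → Pre_wedding_chow chow → Spec_wedding_chow chow (wedding_chow chow)
def Claim_changed_wedding_chow : Prop := Dom_wedding_chow (pvDiffWitness_wedding_chow) ∧ Pre_wedding_chow (pvDiffWitness_wedding_chow) ∧ D_wedding_chow (pvDiffWitness_wedding_chow) ∧ wedding_chow (pvDiffWitness_wedding_chow) = pvDiffWitnessOut_wedding_chow.1 ∧ wedding_chow_alt (pvDiffWitness_wedding_chow) = pvDiffWitnessOut_wedding_chow.2 ∧ pvDiffWitnessOut_wedding_chow.1 ≠ pvDiffWitnessOut_wedding_chow.2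

-- ===== LEMMAS AND PROOFS =====

-- first component of A's outer loop: b accumulates exactly the characters seen so far
lemma pv_fst {s : Type} (f : (List Char × s) → Char → s) (l : List Char) : ∀ (b0 : List Char) (st : s),
    (l.foldl (fun st i => (st.1 ++ [i], f st i)) (b0, st)).1 = b0 ++ l := by
  induction l with
  | nil => simp
  | cons x xs ih => intro b0 st; rw [List.foldl_cons]; simp [ih]

-- A's inner loop, characterised: sol is set iff some scanned char is a base char;
-- n ends as the value produced by the last element of the scanned list
lemma pv_inner (cnt : Char → Int) (q r : Int) (l : List Char) (init : Option Int × Option Int) :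
    l.foldl (fun sn j => if j ∈ (['r', 's', 'm', 'f', 'd'] : List Char) then
        ((some q : Option Int), (some r : Option Int)) else (sn.1, some (cnt j))) init
    = ((if l.any (fun j => decide (j ∈ (['r', 's', 'm', 'f', 'd'] : List Char))) = true then some q else init.1),
       l.getLast?.elim init.2 (fun x => if x ∈ (['r', 's', 'm', 'f', 'd'] : List Char) then some r else some (cnt x))) := by
  induction l using List.reverseRecOn generalizing init with
  | nil => simp
  | append_singleton l x ih =>
    rw [List.foldl_append, List.foldl_cons, List.foldl_nil, ih]
    by_cases hx : x ∈ (['r', 's', 'm', 'f', 'd'] : List Char)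
    · have hx' : x = 'r' ∨ x = 's' ∨ x = 'm' ∨ x = 'f' ∨ x = 'd' := by simpa using hx
      simp [hx, List.any_append]
      tauto
    · have hx' : ¬(x = 'r' ∨ x = 's' ∨ x = 'm' ∨ x = 'f' ∨ x = 'd') := by simpa using hx
      simp [List.any_append, hx']

-- s[0:n] = s[:n] for nonnegative n
lemma pv_slice (s : String) (n : Int) (hn : 0 ≤ n) :
    PySem.Str.slice s (some 0) (some n) = PySem.Str.slice s none (some n) := by
  apply String.toList_inj.mp
  obtain ⟨m, rfl⟩ := Int.eq_ofNat_of_zero_le hn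
  simp only [PySem.Str.toList_slice, PySem.Chars.slice_eq_listSlice]
  rw [show ((0 : Int) = ((0 : Nat) : Int)) from rfl, PySem.List.slice_natCast, PySem.List.slice_to_natCast]
  simp

lemma pv_main (chow : String) (h : Pre_wedding_chow chow) (hnd : ¬ D_wedding_chow chow) :
    wedding_chow chow = wedding_chow_alt chow := by
  obtain ⟨c, hc, hcB⟩ : ∃ c ∈ chow.toList, c ∈ (['r', 's', 'm', 'f', 'd'] : List Char) := by
    unfold Pre_wedding_chow at h
    simpa using h
  have hne : chow.toList ≠ [] := List.ne_nil_of_mem hc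
  obtain ⟨ys, y, hl⟩ := (List.eq_nil_or_concat chow.toList).resolve_left hne
  rw [List.concat_eq_append] at hl
  have hy : y ∈ (['r', 's', 'm', 'f', 'd'] : List Char) := by
    by_contra hyn
    apply hnd
    refine ⟨h, ?_⟩
    rw [hl, List.getLast?_concat]
    simpa using hyn
  unfold wedding_chow wedding_chow_alt
  simp only [PySem.Str.len_eq]
  simp only [hl]
  rw [List.foldl_append, List.foldl_cons, List.foldl_nil]
  have hm := pv_fst (fun (st : List Char × Option Int × Option Int) (i : Char) =>
    List.foldl (fun (sn : Option Int × Option Int) (j : Char) =>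
        if j ∈ (['r', 's', 'm', 'f', 'd'] : List Char) then
          (some (PySem.Int.floordiv (((st.1 ++ [i]).length : Nat) : Int) 5),
           some (PySem.Int.mod (((st.1 ++ [i]).length : Nat) : Int) 5))
        else (sn.1, some ((PySem.List.count (st.1 ++ [i]) j : Nat) : Int)))
      st.2 (st.1 ++ [i])) ys [] (none, none)
  rw [List.nil_append] at hm
  rw [hm]
  rw [pv_inner (fun j => ((PySem.List.count (ys ++ [y]) j : Nat) : Int))
      (PySem.Int.floordiv (((ys ++ [y]).length : Nat) : Int) 5)
      (PySem.Int.mod (((ys ++ [y]).length : Nat) : Int) 5) (ys ++ [y])]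
  have hany : ((ys ++ [y]).any fun j => decide (j ∈ (['r', 's', 'm', 'f', 'd'] : List Char))) = true := by
    rw [List.any_eq_true]
    exact ⟨c, hl ▸ hc, by simpa using hcB⟩
  rw [hany, if_pos rfl, List.getLast?_concat]
  simp only [Option.elim_some, if_pos hy, Option.getD_some]
  have hn : (0 : Int) ≤ PySem.Int.mod (((ys ++ [y]).length : Nat) : Int) 5 := by
    rw [PySem.Int.mod_eq_emod_of_pos (by norm_num : (0:Int) < 5)]
    exact Int.emod_nonneg _ (by norm_num)
  rw [pv_slice chow _ hn]

-- ===== VERDICT (by name: the statement is the Claim_ definition above) =====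
theorem wedding_chow_spec : Claim_unchanged_wedding_chow := by
  intro chow _ hpre
  unfold Spec_wedding_chow
  exact pv_main chow hpre

theorem wedding_chow_changed : Claim_changed_wedding_chow := by
  unfold Claim_changed_wedding_chow; decide
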